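-- pv_equiv track=rewrite | github.com/KimIcexy/Navigation-for-the-visually-impaired | backend/modules/obstacles/navigate/path_planning/__init__.py | path_to_direction
-- ===== SOURCE A (Python) =====
-- def path_to_direction (optimized_path):
--     direction = ["Right", "Left"]
--     output_direction = ["Straight"]
--     output_distance = []
--     last_checkpoint = 0
--     vec_before = (0,-1)
--     for a in range (0, len(optimized_path)-1):
--             #print (optimized_path[a])
--             vec_after = ((optimized_path[a+1][0] - optimized_path[a][0]), (optimized_path[a+1][1] - optimized_path[a][1]))
--             if (vec_before == vec_after):
--                     continue
--             if (vec_before[0] == 0):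
--                     if (vec_before[1] == 1):
--                             output_direction.append (direction[vec_after[0] == 1])
--                     else: #== -1
--                             output_direction.append (direction[vec_after[0] == -1])
--             else:
--                     if (vec_before[0] == 1):
--                             output_direction.append (direction[vec_after[1] == -1])
--                     else: #== -1
--                             output_direction.append (direction[vec_after[1] == 1])
--             output_direction.append ("Straight")
--             output_distance.append (a - last_checkpoint)
--             last_checkpoint = a
--             vec_before = vec_after
--     output_distance.append (len(optimized_path)-1 - last_checkpoint)
--     try:
--         if output_distance [0] <= 5:
--             output_distance.pop(0)
--             output_direction.pop(0)
--     except: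
--         pass
--     return output_direction, output_distance
-- ===== SOURCE B (Python) =====
-- def _turn(prev, cur):
--     if prev[0] == 0:
--         hit = (cur[0] == 1) if prev[1] == 1 else (cur[0] == -1)
--     else:
--         hit = (cur[1] == -1) if prev[0] == 1 else (cur[1] == 1)
--     return "Left" if hit else "Right"
--
-- def path_to_direction(optimized_path):
--     # movement vectors, with the implicit starting heading (0,-1) in front
--     vs = [(0, -1)] + [(q[0] - p[0], q[1] - p[1])
--                       for p, q in zip(optimized_path, optimized_path[1:])]
--     boundaries = [i for i in range(1, len(vs)) if vs[i] != vs[i - 1]]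
--     dirs = ["Straight"]
--     for b in boundaries:
--         dirs.append(_turn(vs[b - 1], vs[b]))
--         dirs.append("Straight")
--     cuts = [0] + [b - 1 for b in boundaries] + [len(optimized_path) - 1]
--     dists = [cuts[i + 1] - cuts[i] for i in range(len(cuts) - 1)]
--     if dists[0] <= 5:
--         dists = dists[1:]
--         dirs = dirs[1:]
--     return dirs, dists
-- ===== Notes on version B (the rewrite author's own statement) =====
-- stated objective: alternative
-- what changed: Replaces A's single stateful scan with vec_before/last_checkpoint bookkeeping by a grouping decomposition: build the movement-vector list with the implicit (0,-1) heading prepended, collect the boundary indices where the vector changes, and assemble the direction list and the distance list (consecutive differences of the cut positions) from those boundaries, with the same <=5 first-pair trim.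
import Mathlib
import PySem

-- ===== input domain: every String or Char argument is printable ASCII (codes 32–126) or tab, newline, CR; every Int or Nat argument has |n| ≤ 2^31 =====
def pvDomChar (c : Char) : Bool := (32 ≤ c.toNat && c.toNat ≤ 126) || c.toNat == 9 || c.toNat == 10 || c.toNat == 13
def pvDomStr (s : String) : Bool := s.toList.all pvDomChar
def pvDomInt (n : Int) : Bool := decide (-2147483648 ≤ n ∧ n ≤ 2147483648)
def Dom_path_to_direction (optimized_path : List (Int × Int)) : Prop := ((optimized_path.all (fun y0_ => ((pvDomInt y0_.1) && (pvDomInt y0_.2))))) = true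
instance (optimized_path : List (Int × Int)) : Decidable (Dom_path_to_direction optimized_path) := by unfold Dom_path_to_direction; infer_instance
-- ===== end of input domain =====

-- B replaces A's single stateful scan (vec_before / last_checkpoint bookkeeping) by a
-- grouping decomposition: build the vector list, pick the boundary indices, assemble both
-- outputs from them (objective: alternative decomposition, same cost).

-- ===== PORT A =====
-- exact: used only with i < xs.length
def pvIdx (xs : List (Int × Int)) (i : Nat) : Int × Int := xs.getD i (0, 0)

def pvAStep (p : List (Int × Int)) (s : List String × List Int × Int × (Int × Int)) (a : Nat) :
    List String × List Int × Int × (Int × Int) :=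
  let va : Int × Int := ((pvIdx p (a+1)).1 - (pvIdx p a).1, (pvIdx p (a+1)).2 - (pvIdx p a).2)
  if s.2.2.2 = va then s
  else
    let d : String :=
      if s.2.2.2.1 = 0 then
        if s.2.2.2.2 = 1 then (["Right","Left"]).getD (if va.1 = 1 then 1 else 0) ""
        else (["Right","Left"]).getD (if va.1 = -1 then 1 else 0) ""
      else
        if s.2.2.2.1 = 1 then (["Right","Left"]).getD (if va.2 = -1 then 1 else 0) ""
        else (["Right","Left"]).getD (if va.2 = 1 then 1 else 0) ""
    (s.1 ++ [d, "Straight"], s.2.1 ++ [(a : Int) - s.2.2.1], (a : Int), va)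

def path_to_direction (optimized_path : List (Int × Int)) : List String × List Int :=
  -- range(0, len-1) is empty for len = 0, like List.range (len - 1)
  let s := (List.range (optimized_path.length - 1)).foldl (pvAStep optimized_path)
    (["Straight"], [], 0, (0, -1))
  let dirs := s.1
  let dists := s.2.1 ++ [((optimized_path.length : Int) - 1) - s.2.2.1]
  match PySem.List.pyGet? dists 0 with
  | none => (dirs, dists)                 -- except: pass
  | some d => if d ≤ 5 then (dirs.drop 1, dists.drop 1) else (dirs, dists)

-- ===== PORT B =====
def pvTurn (prev cur : Int × Int) : String :=
  let hit : Bool :=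
    if prev.1 = 0 then (if prev.2 = 1 then cur.1 = 1 else cur.1 = -1)
    else (if prev.1 = 1 then cur.2 = -1 else cur.2 = 1)
  if hit then "Left" else "Right"

def pvVs (p : List (Int × Int)) : List (Int × Int) :=
  (0, -1) :: (p.zip p.tail).map (fun ab => (ab.2.1 - ab.1.1, ab.2.2 - ab.1.2))

def pvBoundaries (p : List (Int × Int)) : List Nat :=
  (List.range' 1 ((pvVs p).length - 1)).filter
    (fun i => decide ((pvVs p).getD i (0,0) ≠ (pvVs p).getD (i-1) (0,0)))

def path_to_direction_alt (optimized_path : List (Int × Int)) : List String × List Int :=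
  let vs := pvVs optimized_path
  let bs := pvBoundaries optimized_path
  let dirs := bs.foldl
    (fun d b => d ++ [pvTurn (vs.getD (b-1) (0,0)) (vs.getD b (0,0)), "Straight"]) ["Straight"]
  let cuts : List Int := 0 :: (bs.map (fun b : Nat => (b : Int) - 1) ++ [(optimized_path.length : Int) - 1])
  let dists := (cuts.zip cuts.tail).map (fun xy => xy.2 - xy.1)
  match dists with
  | [] => (dirs, [])
  | d :: r => if d ≤ 5 then (dirs.drop 1, r) else (dirs, d :: r)

-- ===== PRECONDITION & SPEC =====
def Spec_path_to_direction (optimized_path : List (Int × Int)) (out : List String × List Int) : Prop := out = path_to_direction_alt optimized_path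
instance (optimized_path : List (Int × Int)) (out : List String × List Int) : Decidable (Spec_path_to_direction optimized_path out) := by unfold Spec_path_to_direction; infer_instance

-- ===== CLAIM (what is proved, stated in full; the proofs are below) =====
def Claim_equal_path_to_direction : Prop := ∀ (optimized_path : List (Int × Int)), Dom_path_to_direction optimized_path → Spec_path_to_direction optimized_path (path_to_direction optimized_path)

-- ===== LEMMAS AND PROOFS =====

-- proof-only helpers: the partial versions of B's assembly up to prefix length a
def pvBnd (p : List (Int × Int)) (a : Nat) : List Nat :=
  (List.range' 1 a).filter
    (fun i => decide ((pvVs p).getD i (0,0) ≠ (pvVs p).getD (i-1) (0,0)))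

def pvDirsOf (p : List (Int × Int)) (bs : List Nat) : List String :=
  bs.foldl (fun d b =>
    d ++ [pvTurn ((pvVs p).getD (b-1) (0,0)) ((pvVs p).getD b (0,0)), "Straight"]) ["Straight"]

def pvDistsFrom (c : Int) : List Nat → List Int
  | [] => []
  | b :: bs => ((b : Int) - 1 - c) :: pvDistsFrom ((b : Int) - 1) bs

def pvLastCut (c : Int) (bs : List Nat) : Int := bs.foldl (fun _ b => (b : Int) - 1) c

theorem pvLastCut_append (c : Int) (bs : List Nat) (b : Nat) :
    pvLastCut c (bs ++ [b]) = (b : Int) - 1 := by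
  simp [pvLastCut, List.foldl_append]

theorem pvDistsFrom_append (bs : List Nat) (c : Int) (b : Nat) :
    pvDistsFrom c (bs ++ [b]) = pvDistsFrom c bs ++ [(b : Int) - 1 - pvLastCut c bs] := by
  induction bs generalizing c with
  | nil => simp [pvDistsFrom, pvLastCut]
  | cons x xs ih =>
      simp only [List.cons_append, pvDistsFrom, ih]
      simp [pvLastCut]

theorem pvCuts_diffs (bs : List Nat) (c F : Int) :
    (((c :: (bs.map (fun b : Nat => (b : Int) - 1) ++ [F])).zip
        (bs.map (fun b : Nat => (b : Int) - 1) ++ [F])).map (fun xy => xy.2 - xy.1))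
      = pvDistsFrom c bs ++ [F - pvLastCut c bs] := by
  induction bs generalizing c with
  | nil => simp [pvDistsFrom, pvLastCut]
  | cons x xs ih =>
      rw [List.map_cons, List.cons_append, List.zip_cons_cons, List.map_cons, ih ((x : Int) - 1)]
      simp [pvDistsFrom, pvLastCut]

theorem pvZipTail_length (p : List (Int × Int)) : (p.zip p.tail).length = p.length - 1 := by
  cases p with
  | nil => simp
  | cons x xs => simp [List.length_zip]

theorem pvVs_length (p : List (Int × Int)) : (pvVs p).length - 1 = p.length - 1 := by
  simp only [pvVs, List.length_cons, List.length_map, Nat.add_sub_cancel]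
  exact pvZipTail_length p


theorem pvVs_getD_succ (p : List (Int × Int)) (a : Nat) (ha : a < p.length - 1) :
    (pvVs p).getD (a + 1) (0,0)
      = ((pvIdx p (a+1)).1 - (pvIdx p a).1, (pvIdx p (a+1)).2 - (pvIdx p a).2) := by
  have hz : a < (p.zip p.tail).length := by rw [pvZipTail_length]; exact ha
  have h1 : a < p.length := by omega
  have h2 : a + 1 < p.length := by omega
  have ht : a < p.tail.length := by simp [List.length_tail]; omega
  have hm : a < ((p.zip p.tail).map (fun ab => (ab.2.1 - ab.1.1, ab.2.2 - ab.1.2))).length := by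
    simpa using hz
  simp only [pvVs, List.getD_cons_succ]
  rw [List.getD_eq_getElem _ _ hm, List.getElem_map, List.getElem_zip]
  simp only [pvIdx]
  rw [List.getD_eq_getElem _ _ h1, List.getD_eq_getElem _ _ h2]
  congr 1 <;> rw [List.getElem_tail]

theorem pvTurn_eq (prev : Int × Int) (x y : Int) :
    (if prev.1 = 0 then
        if prev.2 = 1 then (["Right","Left"]).getD (if x = 1 then 1 else 0) ""
        else (["Right","Left"]).getD (if x = -1 then 1 else 0) ""
      else
        if prev.1 = 1 then (["Right","Left"]).getD (if y = -1 then 1 else 0) ""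
        else (["Right","Left"]).getD (if y = 1 then 1 else 0) "") = pvTurn prev (x, y) := by
  simp only [pvTurn]
  split_ifs <;> simp_all

theorem pvBnd_succ (p : List (Int × Int)) (a : Nat) :
    pvBnd p (a + 1)
      = pvBnd p a ++ (if (pvVs p).getD (a+1) (0,0) ≠ (pvVs p).getD a (0,0)
          then [a + 1] else []) := by
  simp only [pvBnd, List.range'_concat, List.filter_append]
  congr 1
  rw [show 1 + 1 * a = a + 1 by omega, List.filter_cons]
  simp only [List.filter_nil, Nat.add_sub_cancel]
  by_cases h : (pvVs p).getD (a+1) (0,0) = (pvVs p).getD a (0,0)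
  · rw [if_neg (by simp only [decide_eq_true_eq, not_not]; exact h), if_neg (not_not_intro h)]
  · rw [if_pos (by simp only [decide_eq_true_eq]; exact h), if_pos h]

theorem pvLoop_inv (p : List (Int × Int)) (a : Nat) (ha : a ≤ p.length - 1) :
    (List.range a).foldl (pvAStep p) (["Straight"], [], 0, (0, -1))
      = (pvDirsOf p (pvBnd p a), pvDistsFrom 0 (pvBnd p a),
          pvLastCut 0 (pvBnd p a), (pvVs p).getD a (0,0)) := by
  induction a with
  | zero => simp [pvBnd, pvDirsOf, pvDistsFrom, pvLastCut, pvVs]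
  | succ a ih =>
      have ha' : a < p.length - 1 := by omega
      rw [List.range_succ, List.foldl_append, ih (by omega)]
      simp only [List.foldl_cons, List.foldl_nil]
      have hva := pvVs_getD_succ p a ha'
      simp only [pvAStep]
      by_cases heq : (pvVs p).getD a (0,0)
          = ((pvIdx p (a+1)).1 - (pvIdx p a).1, (pvIdx p (a+1)).2 - (pvIdx p a).2)
      · rw [if_pos heq]
        have h2 : (pvVs p).getD (a+1) (0,0) = (pvVs p).getD a (0,0) := hva.trans heq.symm
        rw [pvBnd_succ, if_neg (not_not_intro h2), List.append_nil, h2]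
      · rw [if_neg heq]
        have hne : (pvVs p).getD (a+1) (0,0) ≠ (pvVs p).getD a (0,0) := by
          rw [hva]; exact fun hh => heq hh.symm
        rw [pvBnd_succ, if_pos hne]
        rw [pvTurn_eq, pvDistsFrom_append, pvLastCut_append]
        simp only [pvDirsOf, List.foldl_append, List.foldl_cons, List.foldl_nil,
          Nat.add_sub_cancel]
        rw [hva]
        refine Prod.ext rfl (Prod.ext ?_ (Prod.ext ?_ rfl))
        · congr 1
          congr 1
          push_cast
          ring_nf
        · push_cast
          ring_nf

theorem path_to_direction_main (p : List (Int × Int)) :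
    path_to_direction p = path_to_direction_alt p := by
  unfold path_to_direction path_to_direction_alt
  have hb : pvBoundaries p = pvBnd p (p.length - 1) := by
    simp only [pvBoundaries, pvBnd, pvVs_length]
  rw [pvLoop_inv p (p.length - 1) le_rfl]
  simp only [hb]
  rw [List.tail_cons, pvCuts_diffs (pvBnd p (p.length - 1)) 0 ((p.length : Int) - 1)]
  have hdists : pvDistsFrom 0 (pvBnd p (p.length - 1))
        ++ [(p.length : Int) - 1 - pvLastCut 0 (pvBnd p (p.length - 1))] ≠ [] := by
    simp
  have hdirs : pvDirsOf p (pvBnd p (p.length - 1))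
      = (pvBnd p (p.length - 1)).foldl
          (fun d b => d ++ [pvTurn ((pvVs p).getD (b-1) (0,0)) ((pvVs p).getD b (0,0)),
            "Straight"]) ["Straight"] := rfl
  cases hD : pvDistsFrom 0 (pvBnd p (p.length - 1))
      ++ [(p.length : Int) - 1 - pvLastCut 0 (pvBnd p (p.length - 1))] with
  | nil => exact absurd hD hdists
  | cons d r =>
      simp only [hdirs]
      have : PySem.List.pyGet? (d :: r) (0 : Int) = some d := by
        simp [PySem.List.pyGet?, PySem.List.pyIdx?]
      rw [this]
      split_ifs with h <;> simp <;> omega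

-- ===== VERDICT (by name: the statement is the Claim_ definition above) =====
theorem path_to_direction_spec : Claim_equal_path_to_direction := by
  intro p _
  exact path_to_direction_main p
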